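-- pv_equiv track=rewrite | github.com/dawoodaijaz97/Leetcode | minimum-time-for-k-connected-components/solution.py | solve
-- ===== SOURCE A (Python) =====
-- from typing import List
--
-- def find(parent: List[int], i: int) -> int:
--     if parent[i] != i:
--         parent[i] = find(parent, parent[i])
--     return parent[i]
--
-- def union(parent: List[int], rank: List[int], x: int, y: int) -> None:
--     rootX = find(parent, x)
--     rootY = find(parent, y)
--
--     if rootX != rootY:
--         if rank[rootX] > rank[rootY]:
--             parent[rootY] = rootX
--         elif rank[rootX] < rank[rootY]:
--             parent[rootX] = rootY
--         else:
--             parent[rootY] = rootX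
--             rank[rootX] += 1
--
-- def solve(n: int, edges: List[List[int]], k: int) -> int:
--     if k >= n:
--         return 0
--
--     # Sort edges by time in descending order
--     edges.sort(key=lambda x: -x[2])
--
--     parent = list(range(n))
--     rank = [0] * n
--     components = n
--
--     for u, v, time in edges:
--         if find(parent, u) != find(parent, v):
--             union(parent, rank, u, v)
--             components -= 1
--             if components <= k:
--                 return time
--
--     return -1  # This line should never be reached given the problem constraints
-- ===== SOURCE B (Python) =====
-- from typing import List
--
-- def solve(n: int, edges: List[List[int]], k: int) -> int:
--     if k >= n:
--         return 0
--     edges.sort(key=lambda x: -x[2])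
--     comp = list(range(n))
--     count = n
--     for u, v, t in edges:
--         cu, cv = comp[u], comp[v]
--         if cu != cv:
--             comp = [cu if c == cv else c for c in comp]
--             count -= 1
--             if count <= k:
--                 return t
--     return -1
-- ===== Notes on version B (the rewrite author's own statement) =====
-- stated objective: simpler
-- what changed: B drops the recursive rank/path-compression union-find entirely and instead keeps a flat component-label array, relabelling one component's labels on each merging edge of the same descending scan.
-- outside the precondition, e.g. on solve(2, [[0, -1, 3]], 1): A returns 3, B returns 3; on solve(2, [[0, 1, 9], [7, 7, 3]], 1): A returns 9, B returns 9
import Mathlib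
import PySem

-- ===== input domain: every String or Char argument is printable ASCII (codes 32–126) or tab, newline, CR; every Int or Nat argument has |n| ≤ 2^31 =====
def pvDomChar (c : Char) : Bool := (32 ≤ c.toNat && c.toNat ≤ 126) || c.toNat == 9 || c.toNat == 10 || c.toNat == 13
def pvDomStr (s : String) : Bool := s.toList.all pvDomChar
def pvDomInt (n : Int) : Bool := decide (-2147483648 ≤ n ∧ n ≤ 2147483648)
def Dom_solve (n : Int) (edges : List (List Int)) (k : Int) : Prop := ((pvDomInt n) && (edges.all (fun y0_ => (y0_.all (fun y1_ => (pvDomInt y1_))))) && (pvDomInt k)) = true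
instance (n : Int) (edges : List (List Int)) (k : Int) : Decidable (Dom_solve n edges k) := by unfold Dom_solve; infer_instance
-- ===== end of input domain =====

-- B replaces the recursive rank/path-compression union-find with a flat component-label
-- array relabelled on each merge (simpler, not faster); both A and B sort `edges` in place.


-- ===== PORT A =====
-- find(parent, i) with path compression; the fuel argument only guards termination
-- (ranks strictly increase along parent chains, so parent.length + 1 steps always suffice
-- on the states A actually reaches; the fuel-0 branch is never taken under Pre_solve).
def pvFindA : Nat → List Int → Int → List Int × Int
  | 0, parent, i => (parent, i)
  | fuel+1, parent, i =>
    let pi := PySem.List.pyGetD parent i 0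
    if pi ≠ i then
      let res := pvFindA fuel parent pi
      (PySem.List.pySetD res.1 i res.2, res.2)         -- parent[i] = find(parent, parent[i])
    else (parent, pi)                                   -- return parent[i]

def pvUnionA (parent rank : List Int) (x y : Int) : List Int × List Int :=
  match pvFindA (parent.length + 1) parent x with
  | (p1, rootX) =>
    match pvFindA (p1.length + 1) p1 y with
    | (p2, rootY) =>
      if rootX ≠ rootY then
        if PySem.List.pyGetD rank rootX 0 > PySem.List.pyGetD rank rootY 0 then
          (PySem.List.pySetD p2 rootY rootX, rank)      -- parent[rootY] = rootX
        else if PySem.List.pyGetD rank rootX 0 < PySem.List.pyGetD rank rootY 0 then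
          (PySem.List.pySetD p2 rootX rootY, rank)      -- parent[rootX] = rootY
        else
          (PySem.List.pySetD p2 rootY rootX,
           PySem.List.pySetD rank rootX (PySem.List.pyGetD rank rootX 0 + 1))  -- rank[rootX] += 1
      else (p2, rank)

def pvLoopA (k : Int) : List (List Int) → List Int → List Int → Int → Int
  | [], _, _, _ => -1
  | e :: rest, parent, rank, comps =>
    let u := PySem.List.pyGetD e 0 0
    let v := PySem.List.pyGetD e 1 0
    let t := PySem.List.pyGetD e 2 0
    match pvFindA (parent.length + 1) parent u with
    | (p1, ru) =>
      match pvFindA (p1.length + 1) p1 v with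
      | (p2, rv) =>
        if ru ≠ rv then                                 -- if find(u) != find(v)
          match pvUnionA p2 rank u v with
          | (p3, rank3) =>
            if comps - 1 ≤ k then t
            else pvLoopA k rest p3 rank3 (comps - 1)
        else pvLoopA k rest p2 rank comps

def solve (n : Int) (edges : List (List Int)) (k : Int) : Int :=
  if k ≥ n then 0
  else
    let es := PySem.List.sorted edges (fun x => -(PySem.List.pyGetD x 2 0)) false
    pvLoopA k es ((List.range n.toNat).map Int.ofNat) (List.replicate n.toNat 0) n

-- ===== PORT B =====
def pvLoopB (k : Int) : List (List Int) → List Int → Int → Int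
  | [], _, _ => -1
  | e :: rest, comp, count =>
    let cu := PySem.List.pyGetD comp (PySem.List.pyGetD e 0 0) 0
    let cv := PySem.List.pyGetD comp (PySem.List.pyGetD e 1 0) 0
    if cu ≠ cv then
      if count - 1 ≤ k then PySem.List.pyGetD e 2 0
      else pvLoopB k rest (comp.map (fun c => if c = cv then cu else c)) (count - 1)
    else pvLoopB k rest comp count

def solve_alt (n : Int) (edges : List (List Int)) (k : Int) : Int :=
  if k ≥ n then 0
  else
    let es := PySem.List.sorted edges (fun x => -(PySem.List.pyGetD x 2 0)) false
    pvLoopB k es ((List.range n.toNat).map Int.ofNat) n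

-- ===== PRECONDITION & SPEC =====
def pvEdgeOK (n : Int) (e : List Int) : Bool :=
  match e with
  | [u, v, _] => decide (0 ≤ u ∧ u < n ∧ 0 ≤ v ∧ v < n)
  | _ => false

-- Pre_ excludes (a) malformed edges and out-of-range endpoints, where A raises
-- ValueError/IndexError, and narrows further by (b) excluding negative in-range endpoints
-- and inputs whose early return precedes a later bad edge, where A's value rests on
-- Python's negative-index wraparound resp. lazy unpacking — accidents both programs share.
def Pre_solve (n : Int) (edges : List (List Int)) (k : Int) : Prop :=
  n ≤ k ∨ ∀ e ∈ edges, pvEdgeOK n e = true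
instance (n : Int) (edges : List (List Int)) (k : Int) : Decidable (Pre_solve n edges k) := by
  unfold Pre_solve; infer_instance

def pvWitness_solve : Int × List (List Int) × Int := (3, [[0, 1, 5], [1, 2, 4]], 1)

def Spec_solve (n : Int) (edges : List (List Int)) (k : Int) (out : Int) : Prop := out = solve_alt n edges k
instance (n : Int) (edges : List (List Int)) (k : Int) (out : Int) : Decidable (Spec_solve n edges k out) := by unfold Spec_solve; infer_instance

-- ===== CLAIM (what is proved, stated in full; the proofs are below) =====
def Claim_equal_solve : Prop := ∀ (n : Int) (edges : List (List Int)) (k : Int), Dom_solve n edges k → Pre_solve n edges k → Spec_solve n edges k (solve n edges k)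

-- ===== LEMMAS AND PROOFS =====

-- `gI xs j` is `xs[j]` with default 0 (proof-side shorthand).
def gI (xs : List Int) (j : Nat) : Int := xs.getD j 0

-- `Reaches p i r`: following parent pointers from i ends at root r.
inductive Reaches (p : List Int) : Nat → Nat → Prop
  | self (i : Nat) : i < p.length → gI p i = (i : Int) → Reaches p i i
  | step (i r : Nat) : i < p.length → gI p i ≠ (i : Int) → Reaches p (gI p i).toNat r → Reaches p i r

-- well-formed union-find state: entries in range, ranks strictly increase along edges,
-- every node has a root.
def WF (p rank : List Int) : Prop :=
  (∀ j, j < p.length → 0 ≤ gI p j ∧ (gI p j).toNat < p.length) ∧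
  (∀ j, j < p.length → gI p j ≠ (j : Int) → gI rank j < gI rank (gI p j).toNat) ∧
  (∀ i, i < p.length → ∃ r, Reaches p i r)

def sameClass (p : List Int) (a b : Nat) : Prop := ∃ r, Reaches p a r ∧ Reaches p b r

-- simulation invariant between A's parent array and B's label array
def SimInv (p comp : List Int) : Prop :=
  p.length = comp.length ∧
  ∀ a b, a < p.length → b < p.length → (sameClass p a b ↔ gI comp a = gI comp b)

theorem reaches_lt {p : List Int} {i r : Nat} (h : Reaches p i r) : r < p.length := by
  induction h with
  | self i h _ => exact h
  | step i r _ _ _ ih => exact ih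

theorem reaches_root {p : List Int} {i r : Nat} (h : Reaches p i r) : gI p r = (r : Int) := by
  induction h with
  | self _ _ h => exact h
  | step _ _ _ _ _ ih => exact ih

theorem reaches_det {p : List Int} {i r s : Nat} (h : Reaches p i r) (h' : Reaches p i s) : r = s := by
  induction h generalizing s with
  | self i _ hfix =>
    cases h' with
    | self => rfl
    | step _ _ _ hne _ => exact absurd hfix hne
  | step i r _ hne _ ih =>
    cases h' with
    | self _ _ hfix => exact absurd hfix hne
    | step _ _ _ _ h2 => exact ih h2

theorem rank_le_of_reaches {p rank : List Int} (hWF : WF p rank) {i r : Nat}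
    (h : Reaches p i r) : gI rank i ≤ gI rank r := by
  induction h with
  | self => exact le_rfl
  | step i r hi hne _ ih =>
    exact le_of_lt (lt_of_lt_of_le (hWF.2.1 i hi hne) ih)

theorem rank_lt_of_reaches {p rank : List Int} (hWF : WF p rank) {i r : Nat}
    (h : Reaches p i r) (hne : i ≠ r) : gI rank i < gI rank r := by
  cases h with
  | self => exact absurd rfl hne
  | step i r hi hpi hrest =>
    exact lt_of_lt_of_le (hWF.2.1 i hi hpi) (rank_le_of_reaches hWF hrest)

-- measure for find's fuel
def Scard (rank : List Int) (N : Nat) (i : Nat) : Nat :=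
  ((Finset.range N).filter (fun j => gI rank j ≤ gI rank i)).card

theorem Scard_le (rank : List Int) (N i : Nat) : Scard rank N i ≤ N := by
  classical
  calc ((Finset.range N).filter (fun j => gI rank j ≤ gI rank i)).card
      ≤ (Finset.range N).card := Finset.card_filter_le _ _
    _ = N := Finset.card_range N

theorem Scard_lt (rank : List Int) {N x y : Nat} (hy : y < N) (h : gI rank x < gI rank y) :
    Scard rank N x < Scard rank N y := by
  classical
  apply Finset.card_lt_card
  constructor
  · intro j hj
    simp only [Finset.mem_filter, Finset.mem_range] at *
    exact ⟨hj.1, le_trans hj.2 (le_of_lt h)⟩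
  · intro hsub
    have hy' : y ∈ (Finset.range N).filter (fun j => gI rank j ≤ gI rank y) := by
      simp [Finset.mem_filter, Finset.mem_range, hy]
    have := hsub hy'
    simp only [Finset.mem_filter] at this
    omega


theorem gI_eq {xs : List Int} {j : Nat} (h : j < xs.length) : gI xs j = xs[j] := by
  simp [gI, List.getD_eq_getElem?_getD, List.getElem?_eq_getElem h]

theorem gI_set {xs : List Int} {i : Nat} (v : Int) (j : Nat) (hi : i < xs.length) :
    gI (xs.set i v) j = if j = i then v else gI xs j := by
  by_cases h : j = i
  · subst h
    have : j < (xs.set j v).length := by simpa using hi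
    rw [if_pos rfl, gI_eq this, List.getElem_set_self]
  · rw [if_neg h]
    simp [gI, List.getD_eq_getElem?_getD, List.getElem?_set_ne (by omega : i ≠ j)]

theorem pyGetD_gI {xs : List Int} {i : Int} (h0 : 0 ≤ i) (h1 : i.toNat < xs.length) :
    PySem.List.pyGetD xs i 0 = gI xs i.toNat := by
  rw [PySem.List.pyGetD_eq_getElem xs 0 h0 (by omega), gI_eq h1]

-- path compression p[i] := r preserves the reachability relation
theorem reaches_src_lt {p : List Int} {i r : Nat} (h : Reaches p i r) : i < p.length := by
  cases h with
  | self _ h _ => exact h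
  | step _ _ h _ _ => exact h

theorem reaches_compress {p : List Int} {i r : Nat} (hroot : Reaches p i r) (hir : i ≠ r)
    (hrlt : r < p.length) (j s : Nat) :
    Reaches p j s ↔ Reaches (p.set i (r : Int)) j s := by
  have hilt : i < p.length := reaches_src_lt hroot
  have hgi : ∀ m, gI (p.set i (r : Int)) m = if m = i then (r : Int) else gI p m :=
    fun m => gI_set _ m hilt
  have hg0 : gI (p.set i (r : Int)) i = (r : Int) := by rw [hgi i, if_pos rfl]
  have hrfix : gI (p.set i (r : Int)) r = (r : Int) := by
    rw [hgi r, if_neg (fun hh => hir hh.symm)]; exact reaches_root hroot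
  have hrr : Reaches (p.set i (r : Int)) r r := Reaches.self r (by simpa using hrlt) hrfix
  have hir' : Reaches (p.set i (r : Int)) i r := by
    refine Reaches.step i r (by simpa using hilt) ?_ ?_
    · rw [hg0]; exact fun hh => hir (by exact_mod_cast hh.symm)
    · rw [hg0, Int.toNat_natCast]; exact hrr
  constructor
  · intro h
    induction h with
    | self j hj hfix =>
      by_cases hji : j = i
      · subst hji
        exact absurd (reaches_det hroot (Reaches.self j hj hfix)) (fun hh => hir hh.symm)
      · exact Reaches.self j (by simpa using hj) (by rw [hgi j, if_neg hji]; exact hfix)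
    | step j s hj hne hrest ih =>
      by_cases hji : j = i
      · subst hji
        have hs : s = r := reaches_det (Reaches.step j s hj hne hrest) hroot
        subst hs; exact hir'
      · refine Reaches.step j s (by simpa using hj) ?_ ?_
        · rw [hgi j, if_neg hji]; exact hne
        · have hrw : gI (p.set i (r : Int)) j = gI p j := by rw [hgi j, if_neg hji]
          rw [hrw]; exact ih
  · intro h
    induction h with
    | self j hj hfix =>
      by_cases hji : j = i
      · subst hji
        rw [hg0] at hfix
        exact absurd (by exact_mod_cast hfix : r = j) (fun hh => hir hh.symm)
      · rw [hgi j, if_neg hji] at hfix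
        exact Reaches.self j (by simpa using hj) hfix
    | step j s hj hne hrest ih =>
      by_cases hji : j = i
      · subst hji
        rw [hg0] at hne
        rw [hg0, Int.toNat_natCast] at ih
        have hs : s = r := reaches_det ih (Reaches.self r hrlt (reaches_root hroot))
        subst hs; exact hroot
      · rw [hgi j, if_neg hji] at hne ih
        exact Reaches.step j s (by simpa using hj) hne ih

theorem WF_compress {p rank : List Int} {i r : Nat} (hWF : WF p rank) (hroot : Reaches p i r)
    (hir : i ≠ r) : WF (p.set i (r : Int)) rank := by
  have hilt : i < p.length := reaches_src_lt hroot
  have hrlt : r < p.length := reaches_lt hroot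
  have hgi : ∀ m, gI (p.set i (r : Int)) m = if m = i then (r : Int) else gI p m :=
    fun m => gI_set _ m hilt
  refine ⟨?_, ?_, ?_⟩
  · intro j hj
    rw [List.length_set] at hj
    rw [hgi j, List.length_set]
    by_cases hji : j = i
    · rw [if_pos hji]; exact ⟨Int.natCast_nonneg r, by simpa using hrlt⟩
    · rw [if_neg hji]; exact hWF.1 j hj
  · intro j hj hne
    rw [List.length_set] at hj
    by_cases hji : j = i
    · rw [hgi j, if_pos hji]
      subst hji
      simpa using rank_lt_of_reaches hWF hroot hir
    · rw [hgi j, if_neg hji] at hne ⊢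
      exact hWF.2.1 j hj hne
  · intro m hm
    rw [List.length_set] at hm
    obtain ⟨s, hs⟩ := hWF.2.2 m hm
    exact ⟨s, (reaches_compress hroot hir hrlt m s).mp hs⟩

theorem findA_spec (rank : List Int) : ∀ (fuel : Nat) (p : List Int) (i : Int),
    WF p rank → 0 ≤ i → i.toNat < p.length →
    p.length + 1 ≤ fuel + Scard rank p.length i.toNat →
    ∃ p' r, pvFindA fuel p i = (p', r) ∧ WF p' rank ∧ p'.length = p.length ∧
      0 ≤ r ∧ Reaches p i.toNat r.toNat ∧
      (∀ j s, Reaches p j s ↔ Reaches p' j s) := by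
  intro fuel
  induction fuel with
  | zero =>
    intro p i hWF h0 h1 hm
    have := Scard_le rank p.length i.toNat
    omega
  | succ fuel ih =>
    intro p i hWF h0 h1 hm
    have hpi : PySem.List.pyGetD p i 0 = gI p i.toNat := pyGetD_gI h0 h1
    have hcastI : ((i.toNat : Nat) : Int) = i := Int.toNat_of_nonneg h0
    by_cases hcase : PySem.List.pyGetD p i 0 ≠ i
    · -- recursive case
      have hcond : gI p i.toNat ≠ ((i.toNat : Nat) : Int) := by rw [← hpi, hcastI]; exact hcase
      have hrange := hWF.1 i.toNat h1
      have hrk : gI rank i.toNat < gI rank (gI p i.toNat).toNat := hWF.2.1 i.toNat h1 hcond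
      have hm' : p.length + 1 ≤ fuel + Scard rank p.length (PySem.List.pyGetD p i 0).toNat := by
        have := Scard_lt rank (N := p.length) (x := i.toNat) (y := (gI p i.toNat).toNat) hrange.2 hrk
        rw [hpi]; omega
      obtain ⟨p1, r, heq, hWF1, hlen1, hr0, hreach, hiff⟩ :=
        ih p (PySem.List.pyGetD p i 0) hWF (hpi ▸ hrange.1) (by rw [hpi]; exact hrange.2) hm'
      have hreachI : Reaches p i.toNat r.toNat := by
        refine Reaches.step i.toNat r.toNat h1 hcond ?_
        exact hpi ▸ hreach
      have hirN : i.toNat ≠ r.toNat := by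
        intro hh
        have h2 : gI rank (gI p i.toNat).toNat ≤ gI rank r.toNat := by
          exact rank_le_of_reaches hWF (hpi ▸ hreach)
        rw [← hh] at h2; omega
      have hreach1 : Reaches p1 i.toNat r.toNat := (hiff i.toNat r.toNat).mp hreachI
      have hrlt1 : r.toNat < p1.length := reaches_lt hreach1
      have hcastR : ((r.toNat : Nat) : Int) = r := Int.toNat_of_nonneg hr0
      refine ⟨p1.set i.toNat r, r, ?_, ?_, ?_, hr0, hreachI, ?_⟩
      · rw [pvFindA]
        simp only [if_pos hcase, heq, PySem.List.pySetD_of_nonneg _ _ h0]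
      · have := WF_compress hWF1 hreach1 hirN
        rw [hcastR] at this; exact this
      · rw [List.length_set]; exact hlen1
      · intro j s
        have hc := reaches_compress hreach1 hirN hrlt1 j s
        rw [hcastR] at hc
        exact (hiff j s).trans hc
    · -- parent[i] == i : i is a root
      simp only [not_not] at hcase
      refine ⟨p, PySem.List.pyGetD p i 0, ?_, hWF, rfl, ?_, ?_, fun j s => Iff.rfl⟩
      · rw [pvFindA]; simp [hcase]
      · rw [hcase]; exact h0
      · rw [hcase]
        exact Reaches.self i.toNat h1 (by rw [← hpi, hcase, hcastI])


theorem reaches_link_keep {p : List Int} {rx ry : Nat} (hry : ry < p.length)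
    (hfy : gI p ry = (ry : Int)) {j s : Nat} (hsy : s ≠ ry) (h : Reaches p j s) :
    Reaches (p.set ry (rx : Int)) j s := by
  have hgi : ∀ m, gI (p.set ry (rx : Int)) m = if m = ry then (rx : Int) else gI p m :=
    fun m => gI_set _ m hry
  induction h with
  | self j hj hfix =>
    exact Reaches.self j (by simpa using hj) (by rw [hgi j, if_neg hsy]; exact hfix)
  | step j s hj hne' hrest ih =>
    by_cases hjy : j = ry
    · subst hjy
      exact absurd (reaches_det (Reaches.step j s hj hne' hrest) (Reaches.self j hj hfy)) hsy
    · exact Reaches.step j s (by simpa using hj)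
        (by rw [hgi j, if_neg hjy]; exact hne') (by rw [hgi j, if_neg hjy]; exact ih hsy)

theorem reaches_link_move {p : List Int} {rx ry : Nat} (hrx : rx < p.length) (hry : ry < p.length)
    (hfx : gI p rx = (rx : Int)) (hfy : gI p ry = (ry : Int)) (hne : rx ≠ ry) {j s : Nat}
    (h : Reaches p j s) (hs : s = ry) : Reaches (p.set ry (rx : Int)) j rx := by
  have hgi : ∀ m, gI (p.set ry (rx : Int)) m = if m = ry then (rx : Int) else gI p m :=
    fun m => gI_set _ m hry
  have hgx : gI (p.set ry (rx : Int)) rx = (rx : Int) := by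
    rw [hgi rx, if_neg hne]; exact hfx
  have hrrx : Reaches (p.set ry (rx : Int)) rx rx := Reaches.self rx (by simpa using hrx) hgx
  revert hs
  induction h with
  | self j hj _ =>
    intro hs
    subst hs
    refine Reaches.step j rx (by simpa using hj) ?_ ?_
    · rw [hgi j, if_pos rfl]
      exact fun hh => hne (by exact_mod_cast hh)
    · rw [hgi j, if_pos rfl, Int.toNat_natCast]; exact hrrx
  | step j s hj hne' hrest ih =>
    intro hs
    subst hs
    by_cases hjy : j = s
    · subst hjy; exact absurd hfy hne'
    · exact Reaches.step j rx (by simpa using hj)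
        (by rw [hgi j, if_neg hjy]; exact hne') (by rw [hgi j, if_neg hjy]; exact ih rfl)

theorem sameClass_iff_root {p : List Int} {a b ra rb : Nat}
    (hra : Reaches p a ra) (hrb : Reaches p b rb) : sameClass p a b ↔ ra = rb := by
  constructor
  · rintro ⟨r, h1, h2⟩
    exact (reaches_det hra h1).trans (reaches_det hrb h2).symm
  · intro h
    exact ⟨ra, hra, h ▸ hrb⟩

theorem sameClass_congr {p p' : List Int} (h : ∀ j s, Reaches p j s ↔ Reaches p' j s)
    (a b : Nat) : sameClass p a b ↔ sameClass p' a b := by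
  unfold sameClass
  exact exists_congr fun r => and_congr (h a r) (h b r)

theorem reaches_move_root {p : List Int} {rx ry : Nat} (hrx : rx < p.length)
    (hry : ry < p.length) (hfx : gI p rx = (rx : Int)) (hfy : gI p ry = (ry : Int))
    (hne : rx ≠ ry) {a ra : Nat} (hra : Reaches p a ra) :
    Reaches (p.set ry (rx : Int)) a (if ra = ry then rx else ra) := by
  by_cases h : ra = ry
  · rw [if_pos h]; exact reaches_link_move hrx hry hfx hfy hne hra h
  · rw [if_neg h]; exact reaches_link_keep hry hfy h hra

theorem link_sameClass {p : List Int} {rx ry : Nat} (hrx : rx < p.length) (hry : ry < p.length)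
    (hfx : gI p rx = (rx : Int)) (hfy : gI p ry = (ry : Int)) (hne : rx ≠ ry)
    {a b ra rb : Nat} (hra : Reaches p a ra) (hrb : Reaches p b rb) :
    sameClass (p.set ry (rx : Int)) a b ↔
      (ra = rb ∨ ((ra = rx ∨ ra = ry) ∧ (rb = rx ∨ rb = ry))) := by
  have ha := reaches_move_root hrx hry hfx hfy hne hra
  have hb := reaches_move_root hrx hry hfx hfy hne hrb
  constructor
  · rintro ⟨r, h1, h2⟩
    have e1 := reaches_det h1 ha
    have e2 := reaches_det h2 hb
    by_cases h3 : ra = ry <;> by_cases h4 : rb = ry <;> simp [h3, h4] at e1 e2 <;> omega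
  · intro h
    refine ⟨if ra = ry then rx else ra, ha, ?_⟩
    have heq : (if ra = ry then rx else ra) = (if rb = ry then rx else rb) := by
      by_cases h3 : ra = ry <;> by_cases h4 : rb = ry <;> simp [h3, h4] <;> omega
    rw [heq]; exact hb

theorem WF_link {p rank rank' : List Int} (hWF : WF p rank) {rx ry : Nat}
    (hrx : rx < p.length) (hry : ry < p.length) (hfx : gI p rx = (rx : Int))
    (hfy : gI p ry = (ry : Int)) (hne : rx ≠ ry)
    (hpres : ∀ j, j < p.length → gI p j ≠ (j : Int) → gI rank' j < gI rank' (gI p j).toNat)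
    (hnew : gI rank' ry < gI rank' rx) : WF (p.set ry (rx : Int)) rank' := by
  have hgi : ∀ m, gI (p.set ry (rx : Int)) m = if m = ry then (rx : Int) else gI p m :=
    fun m => gI_set _ m hry
  refine ⟨?_, ?_, ?_⟩
  · intro j hj
    rw [List.length_set] at hj
    rw [hgi j, List.length_set]
    by_cases hjy : j = ry
    · rw [if_pos hjy]
      exact ⟨Int.natCast_nonneg rx, by simpa using hrx⟩
    · rw [if_neg hjy]; exact hWF.1 j hj
  · intro j hj hne'
    rw [List.length_set] at hj
    by_cases hjy : j = ry
    · rw [hgi j, if_pos hjy]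
      subst hjy
      simpa using hnew
    · rw [hgi j, if_neg hjy] at hne' ⊢
      exact hpres j hj hne'
  · intro m hm
    rw [List.length_set] at hm
    obtain ⟨ra, hra⟩ := hWF.2.2 m hm
    exact ⟨_, reaches_move_root hrx hry hfx hfy hne hra⟩

theorem gI_map {comp : List Int} (f : Int → Int) {a : Nat} (h : a < comp.length) :
    gI (comp.map f) a = f (gI comp a) := by
  rw [gI_eq (by simpa using h), gI_eq h, List.getElem_map]

set_option maxHeartbeats 1000000 in
theorem unionA_spec {p rank : List Int} (hWF : WF p rank) (hrlen : rank.length = p.length)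
    {u v : Int} (hu0 : 0 ≤ u) (hu : u.toNat < p.length) (hv0 : 0 ≤ v) (hv : v.toNat < p.length)
    {ru rv : Nat} (hru : Reaches p u.toNat ru) (hrv : Reaches p v.toNat rv) (hne : ru ≠ rv) :
    ∃ p' rank', pvUnionA p rank u v = (p', rank') ∧ WF p' rank' ∧
      rank'.length = rank.length ∧ p'.length = p.length ∧
      (∀ a b ra rb, Reaches p a ra → Reaches p b rb →
        (sameClass p' a b ↔ (ra = rb ∨ ((ra = ru ∨ ra = rv) ∧ (rb = ru ∨ rb = rv))))) := by
  obtain ⟨p1, r1, he1, hWF1, hlen1, hr10, hre1, hiff1⟩ :=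
    findA_spec rank (p.length + 1) p u hWF hu0 hu (Nat.le_add_right _ _)
  obtain ⟨p2, r2, he2, hWF2, hlen2, hr20, hre2, hiff2⟩ :=
    findA_spec rank (p1.length + 1) p1 v hWF1 hv0 (by rw [hlen1]; exact hv)
      (by rw [hlen1]; exact Nat.le_add_right _ _)
  have hlen2' : p2.length = p.length := hlen2.trans hlen1
  have heru : r1.toNat = ru := reaches_det hre1 hru
  have hre2p : Reaches p v.toNat r2.toNat := (hiff1 _ _).mpr hre2
  have herv : r2.toNat = rv := reaches_det hre2p hrv
  have hr1 : r1 = (ru : Int) := by omega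
  have hr2 : r2 = (rv : Int) := by omega
  have hiff12 : ∀ j s, Reaches p j s ↔ Reaches p2 j s :=
    fun j s => (hiff1 j s).trans (hiff2 j s)
  have hru2 : Reaches p2 u.toNat ru := (hiff12 _ _).mp hru
  have hrv2 : Reaches p2 v.toNat rv := (hiff12 _ _).mp hrv
  have hrxlt : ru < p2.length := by rw [hlen2']; exact (reaches_lt hru)
  have hrylt : rv < p2.length := by rw [hlen2']; exact (reaches_lt hrv)
  have hfx2 : gI p2 ru = (ru : Int) := reaches_root hru2
  have hfy2 : gI p2 rv = (rv : Int) := reaches_root hrv2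
  have hrulen : ru < rank.length := by rw [hrlen]; exact reaches_lt hru
  have hrvlen : rv < rank.length := by rw [hrlen]; exact reaches_lt hrv
  have hne' : r1 ≠ r2 := by rw [hr1, hr2]; exact_mod_cast hne
  have hgetx : PySem.List.pyGetD rank r1 0 = gI rank ru := by
    rw [hr1]; exact pyGetD_gI (Int.natCast_nonneg ru) (by simpa using hrulen)
  have hgety : PySem.List.pyGetD rank r2 0 = gI rank rv := by
    rw [hr2]; exact pyGetD_gI (Int.natCast_nonneg rv) (by simpa using hrvlen)
  have hchar : ∀ (q : List Int), (∀ a b ra rb, Reaches p2 a ra → Reaches p2 b rb →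
      (sameClass q a b ↔ (ra = rb ∨ ((ra = ru ∨ ra = rv) ∧ (rb = ru ∨ rb = rv))))) →
      (∀ a b ra rb, Reaches p a ra → Reaches p b rb →
      (sameClass q a b ↔ (ra = rb ∨ ((ra = ru ∨ ra = rv) ∧ (rb = ru ∨ rb = rv))))) := by
    intro q hq a b ra rb hra hrb
    exact hq a b ra rb ((hiff12 _ _).mp hra) ((hiff12 _ _).mp hrb)
  by_cases hgt : PySem.List.pyGetD rank r1 0 > PySem.List.pyGetD rank r2 0
  · refine ⟨p2.set rv (ru : Int), rank, ?_, ?_, rfl, by simpa using hlen2', ?_⟩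
    · simp only [pvUnionA, he1, he2, if_pos hne', if_pos hgt]
      rw [PySem.List.pySetD_of_nonneg _ _ hr20, hr2, Int.toNat_natCast, hr1]
    · exact WF_link hWF2 hrxlt hrylt hfx2 hfy2 hne hWF2.2.1
        (by rw [hgetx, hgety] at hgt; omega)
    · refine hchar _ ?_
      intro a b ra rb hra hrb
      exact link_sameClass hrxlt hrylt hfx2 hfy2 hne hra hrb
  · by_cases hlt : PySem.List.pyGetD rank r1 0 < PySem.List.pyGetD rank r2 0
    · refine ⟨p2.set ru (rv : Int), rank, ?_, ?_, rfl, by simpa using hlen2', ?_⟩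
      · simp only [pvUnionA, he1, he2, if_pos hne', if_neg hgt, if_pos hlt]
        rw [PySem.List.pySetD_of_nonneg _ _ hr10, hr1, Int.toNat_natCast, hr2]
      · exact WF_link hWF2 hrylt hrxlt hfy2 hfx2 (Ne.symm hne) hWF2.2.1
          (by rw [hgetx, hgety] at hlt; omega)
      · refine hchar _ ?_
        intro a b ra rb hra hrb
        have := link_sameClass hrylt hrxlt hfy2 hfx2 (Ne.symm hne) hra hrb
        rw [this]
        tauto
    · -- equal ranks: parent[rootY] = rootX and rank[rootX] += 1
      have heqr : gI rank ru = gI rank rv := by rw [hgetx, hgety] at hgt hlt; omega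
      have hgirk : ∀ m, gI (rank.set ru (gI rank ru + 1)) m =
          if m = ru then gI rank ru + 1 else gI rank m := fun m => gI_set _ m hrulen
      refine ⟨p2.set rv (ru : Int), rank.set ru (gI rank ru + 1), ?_, ?_, by simp, by simpa using hlen2', ?_⟩
      · simp only [pvUnionA, he1, he2, if_pos hne', if_neg hgt, if_neg hlt]
        rw [PySem.List.pySetD_of_nonneg _ _ hr20, PySem.List.pySetD_of_nonneg _ _ hr10,
          hgetx, hr2, Int.toNat_natCast, hr1, Int.toNat_natCast]
      · refine WF_link hWF2 hrxlt hrylt hfx2 hfy2 hne ?_ ?_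
        · intro j hj hne''
          have hold := hWF2.2.1 j hj hne''
          have hjru : j ≠ ru := by
            intro hh; subst hh; exact hne'' hfx2
          rw [hgirk j, hgirk (gI p2 j).toNat, if_neg hjru]
          by_cases hh : (gI p2 j).toNat = ru
          · rw [if_pos hh]; rw [hh] at hold; omega
          · rw [if_neg hh]; exact hold
        · rw [hgirk rv, hgirk ru, if_neg (Ne.symm hne), if_pos rfl]
          omega
      · refine hchar _ ?_
        intro a b ra rb hra hrb
        exact link_sameClass hrxlt hrylt hfx2 hfy2 hne hra hrb

set_option maxHeartbeats 1000000 in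
theorem loop_sim (k : Int) : ∀ (es : List (List Int)) (p rank comp : List Int) (cnt : Int),
    WF p rank → rank.length = p.length → SimInv p comp →
    (∀ e ∈ es, ∃ u v t : Int, e = [u, v, t] ∧ 0 ≤ u ∧ u.toNat < p.length ∧ 0 ≤ v ∧ v.toNat < p.length) →
    pvLoopA k es p rank cnt = pvLoopB k es comp cnt := by
  intro es
  induction es with
  | nil => intros; rfl
  | cons e rest ih =>
    intro p rank comp cnt hWF hrlen hSim hes
    obtain ⟨u, v, t, he, hu0, hu, hv0, hv⟩ := hes e (by simp)
    subst he
    have hclen : comp.length = p.length := hSim.1.symm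
    obtain ⟨p1, r1, he1, hWF1, hlen1, hr10, hre1, hiff1⟩ :=
      findA_spec rank (p.length + 1) p u hWF hu0 hu (Nat.le_add_right _ _)
    obtain ⟨p2, r2, he2, hWF2, hlen2, hr20, hre2, hiff2⟩ :=
      findA_spec rank (p1.length + 1) p1 v hWF1 hv0 (by rw [hlen1]; exact hv)
        (by rw [hlen1]; exact Nat.le_add_right _ _)
    have hlen2' : p2.length = p.length := hlen2.trans hlen1
    have hre2p : Reaches p v.toNat r2.toNat := (hiff1 _ _).mpr hre2
    have hiff12 : ∀ j s, Reaches p j s ↔ Reaches p2 j s :=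
      fun j s => (hiff1 j s).trans (hiff2 j s)
    have hgu : PySem.List.pyGetD ([u, v, t] : List Int) 0 0 = u := rfl
    have hgv : PySem.List.pyGetD ([u, v, t] : List Int) 1 0 = v := rfl
    have hgt : PySem.List.pyGetD ([u, v, t] : List Int) 2 0 = t := rfl
    have hcu : PySem.List.pyGetD comp u 0 = gI comp u.toNat :=
      pyGetD_gI hu0 (by rw [hclen]; exact hu)
    have hcv : PySem.List.pyGetD comp v 0 = gI comp v.toNat :=
      pyGetD_gI hv0 (by rw [hclen]; exact hv)
    have hguard : r1 = r2 ↔ gI comp u.toNat = gI comp v.toNat := by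
      rw [← hSim.2 u.toNat v.toNat hu hv, sameClass_iff_root hre1 hre2p]
      omega
    have hrest' : ∀ e ∈ rest, ∃ u v t : Int, e = [u, v, t] ∧ 0 ≤ u ∧ u.toNat < p.length ∧ 0 ≤ v ∧ v.toNat < p.length :=
      fun e hee => hes e (by simp [hee])
    by_cases hr : r1 = r2
    · have hcb : gI comp u.toNat = gI comp v.toNat := hguard.mp hr
      have : pvLoopA k ([u, v, t] :: rest) p rank cnt = pvLoopA k rest p2 rank cnt := by
        simp only [pvLoopA, hgu, hgv, hgt, he1, he2, if_neg (not_not.mpr hr)]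
      rw [this]
      have hB : pvLoopB k ([u, v, t] :: rest) comp cnt = pvLoopB k rest comp cnt := by
        simp only [pvLoopB, hgu, hgv, hcu, hcv, if_neg (not_not.mpr hcb)]
      rw [hB]
      refine ih p2 rank comp cnt hWF2 (by rw [hlen2']; exact hrlen) ?_ (by rw [hlen2']; exact hrest')
      refine ⟨by rw [hlen2']; exact hSim.1, ?_⟩
      intro a b ha hb
      rw [← sameClass_congr hiff12 a b]
      exact hSim.2 a b (by rwa [hlen2'] at ha) (by rwa [hlen2'] at hb)
    · have hcb : gI comp u.toNat ≠ gI comp v.toNat := fun hh => hr (hguard.mpr hh)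
      have hneN : r1.toNat ≠ r2.toNat := by omega
      obtain ⟨p3, rank3, he3, hWF3, hrk3, hp3, hchar⟩ :=
        unionA_spec hWF2 (by rw [hlen2']; exact hrlen) hu0 (by rw [hlen2']; exact hu)
          hv0 (by rw [hlen2']; exact hv) ((hiff12 _ _).mp hre1) ((hiff12 _ _).mp hre2p) hneN
      have hA : pvLoopA k ([u, v, t] :: rest) p rank cnt =
          (if cnt - 1 ≤ k then t else pvLoopA k rest p3 rank3 (cnt - 1)) := by
        simp only [pvLoopA, hgu, hgv, hgt, he1, he2, if_pos hr, he3]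
      have hB : pvLoopB k ([u, v, t] :: rest) comp cnt =
          (if cnt - 1 ≤ k then t
           else pvLoopB k rest (comp.map (fun c => if c = gI comp v.toNat then gI comp u.toNat else c)) (cnt - 1)) := by
        simp only [pvLoopB, hgu, hgv, hgt, hcu, hcv, if_pos hcb]
      rw [hA, hB]
      by_cases hstop : cnt - 1 ≤ k
      · rw [if_pos hstop, if_pos hstop]
      · rw [if_neg hstop, if_neg hstop]
        refine ih p3 rank3 _ (cnt - 1) hWF3
          (by rw [hrk3, hp3, hlen2']; exact hrlen) ?_ (by rw [hp3, hlen2']; exact hrest')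
        refine ⟨by simp [hp3, hlen2', hclen], ?_⟩
        intro a b ha hb
        rw [hp3, hlen2'] at ha hb
        obtain ⟨ra, hra⟩ := hWF.2.2 a ha
        obtain ⟨rb, hrb⟩ := hWF.2.2 b hb
        rw [hchar a b ra rb ((hiff12 _ _).mp hra) ((hiff12 _ _).mp hrb)]
        rw [gI_map _ (by rw [hclen]; exact ha), gI_map _ (by rw [hclen]; exact hb)]
        have hA1 : gI comp a = gI comp u.toNat ↔ ra = r1.toNat := by
          rw [← hSim.2 a u.toNat ha hu, sameClass_iff_root hra hre1]
        have hA2 : gI comp a = gI comp v.toNat ↔ ra = r2.toNat := by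
          rw [← hSim.2 a v.toNat ha hv, sameClass_iff_root hra hre2p]
        have hB1 : gI comp b = gI comp u.toNat ↔ rb = r1.toNat := by
          rw [← hSim.2 b u.toNat hb hu, sameClass_iff_root hrb hre1]
        have hB2 : gI comp b = gI comp v.toNat ↔ rb = r2.toNat := by
          rw [← hSim.2 b v.toNat hb hv, sameClass_iff_root hrb hre2p]
        have hAB : gI comp a = gI comp b ↔ ra = rb := by
          rw [← hSim.2 a b ha hb, sameClass_iff_root hra hrb]
        have hB1' : gI comp u.toNat = gI comp b ↔ rb = r1.toNat := eq_comm.trans hB1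
        have hA1' : gI comp a = gI comp u.toNat ↔ ra = r1.toNat := hA1
        by_cases h1 : gI comp a = gI comp v.toNat <;> by_cases h2 : gI comp b = gI comp v.toNat
        · rw [if_pos h1, if_pos h2]
          simp only [hA2] at h1
          simp only [hB2] at h2
          simp only [iff_true]
          omega
        · rw [if_pos h1, if_neg h2, hB1']
          simp only [hA2] at h1
          simp only [hB2] at h2
          omega
        · rw [if_neg h1, if_pos h2, hA1']
          simp only [hA2] at h1
          simp only [hB2] at h2
          omega
        · rw [if_neg h1, if_neg h2, hAB]
          simp only [hA2] at h1
          simp only [hB2] at h2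
          omega

theorem edgeOK_shape {n : Int} {e : List Int} (h : pvEdgeOK n e = true) :
    ∃ u v t : Int, e = [u, v, t] ∧ 0 ≤ u ∧ u < n ∧ 0 ≤ v ∧ v < n := by
  rcases e with _ | ⟨u, _ | ⟨v, _ | ⟨t, _ | rest⟩⟩⟩ <;> simp [pvEdgeOK] at h
  exact ⟨u, v, t, rfl, h.1, h.2.1, h.2.2.1, h.2.2.2⟩

-- ===== VERDICT (by name: the statement is the Claim_ definition above) =====
theorem solve_spec : Claim_equal_solve := by
  intro n edges k _ hPre
  show solve n edges k = solve_alt n edges k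
  by_cases hk : k ≥ n
  · simp only [solve, solve_alt, if_pos hk]
  · rcases hPre with hpk | hed
    · exact absurd hpk hk
    · simp only [solve, solve_alt, if_neg hk]
      have hlen0 : ((List.range n.toNat).map Int.ofNat).length = n.toNat := by simp
      have hg0 : ∀ j, j < n.toNat → gI ((List.range n.toNat).map Int.ofNat) j = (j : Int) := by
        intro j hj
        rw [gI_eq (by simpa using hj)]
        simp only [List.getElem_map, List.getElem_range]
        rfl
      refine loop_sim k _ _ _ _ n ⟨?_, ?_, ?_⟩ (by simp) ⟨rfl, ?_⟩ ?_
      · intro j hj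
        rw [hlen0] at hj
        rw [hg0 j hj, hlen0]
        exact ⟨Int.natCast_nonneg j, by simpa using hj⟩
      · intro j hj hne
        rw [hlen0] at hj
        rw [hg0 j hj] at hne
        exact absurd rfl hne
      · intro i hi
        rw [hlen0] at hi
        exact ⟨i, Reaches.self i (by rwa [hlen0]) (hg0 i hi)⟩
      · intro a b ha hb
        rw [hlen0] at ha hb
        rw [hg0 a ha, hg0 b hb]
        constructor
        · rintro ⟨r, h1, h2⟩
          have e1 := reaches_det h1 (Reaches.self a (by rwa [hlen0]) (hg0 a ha))
          have e2 := reaches_det h2 (Reaches.self b (by rwa [hlen0]) (hg0 b hb))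
          omega
        · intro hab
          have hab' : a = b := by exact_mod_cast hab
          subst hab'
          exact ⟨a, Reaches.self a (by rwa [hlen0]) (hg0 a ha), Reaches.self a (by rwa [hlen0]) (hg0 a ha)⟩
      · intro e hee
        have hme : e ∈ edges := (PySem.List.mem_sorted edges _ false e).mp hee
        obtain ⟨u, v, t, hsh, hu0, hun, hv0, hvn⟩ := edgeOK_shape (hed e hme)
        exact ⟨u, v, t, hsh, hu0, by rw [hlen0]; omega, hv0, by rw [hlen0]; omega⟩
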